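-- pv_equiv track=rewrite | github.com/AbdurrahmanAdni/Shape-Recognition | recognitor.py | isSegilimaSamaSisi
-- ===== SOURCE A (Python) =====
-- import itertools
--
-- def isSegilimaSamaSisi(a, myList):
--     if (a == 5) :
--         counter = 0
--         combList = []
--         for L in range(0, len(myList)+1):
--             for subset in itertools.combinations(myList, L):
--                 if(len(subset) == 2) :
--                     if (abs(subset[0] - subset[1]) <=2) :
--                         counter = counter + 1
--
--         if (counter == 5) :
--             return "sisiSamaPanjang = 5"
--         else :
--             return "/"
--     else :
--         return "/"
-- ===== SOURCE B (Python) =====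
-- def isSegilimaSamaSisi(a, myList):
--     if a != 5:
--         return "/"
--     counter = 0
--     rest = list(myList)
--     while rest:
--         x = rest.pop(0)
--         for y in rest:
--             if abs(x - y) <= 2:
--                 counter += 1
--     return "sisiSamaPanjang = 5" if counter == 5 else "/"
-- ===== Notes on version B (the rewrite author's own statement) =====
-- stated objective: alternative
-- what changed: Replaces the enumeration of all 2^n subsets (itertools.combinations for every length L, filtered down to the length-2 ones) by a direct double loop that counts pairs with |x-y| <= 2; this avoids exponential work on the a==5 path, though a timing run (which mostly draws a != 5) does not exercise it.
import Mathlib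
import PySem

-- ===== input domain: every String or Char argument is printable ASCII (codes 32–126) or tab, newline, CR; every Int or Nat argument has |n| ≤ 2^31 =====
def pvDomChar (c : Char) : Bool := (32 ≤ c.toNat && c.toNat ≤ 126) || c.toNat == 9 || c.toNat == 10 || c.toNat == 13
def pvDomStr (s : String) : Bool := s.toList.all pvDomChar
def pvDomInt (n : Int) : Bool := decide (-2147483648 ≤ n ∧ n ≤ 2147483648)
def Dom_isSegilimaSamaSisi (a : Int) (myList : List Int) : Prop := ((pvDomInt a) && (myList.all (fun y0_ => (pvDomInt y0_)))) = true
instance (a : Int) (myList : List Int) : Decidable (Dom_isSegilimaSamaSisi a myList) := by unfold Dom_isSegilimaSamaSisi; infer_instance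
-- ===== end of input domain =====

-- B replaces A's 2^n subset enumeration by a direct double loop over pairs; same return value everywhere.

-- ===== PORT A =====
-- itertools.combinations(xs, k) in Python's order (subsets containing the first element come first)
def combos : Nat → List Int → List (List Int)
  | 0, _ => [[]]
  | _+1, [] => []
  | k+1, x :: xs => ((combos k xs).map (fun s => x :: s)) ++ combos (k+1) xs

def isSegilimaSamaSisi (a : Int) (myList : List Int) : String :=
  if a == 5 then
    let counter : Int :=
      (PySem.List.pyRange 0 ((myList.length : Int) + 1) 1).foldl (fun c L =>
        (combos L.toNat myList).foldl (fun c subset =>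
          -- the len(subset)==2 test plus subset[0]/subset[1] indexing, as one pattern match
          match subset with
          | [x, y] => if |x - y| ≤ 2 then c + 1 else c
          | _ => c) c) 0
    if counter == 5 then "sisiSamaPanjang = 5" else "/"
  else "/"

-- ===== PORT B =====
-- while rest: x = rest.pop(0); for y in rest: if |x-y| <= 2: counter += 1
def altLoop : List Int → Int → Int
  | [], c => c
  | x :: rest, c => altLoop rest (rest.foldl (fun c y => if |x - y| ≤ 2 then c + 1 else c) c)

def isSegilimaSamaSisi_alt (a : Int) (myList : List Int) : String :=
  if a ≠ 5 then "/"
  else if altLoop myList 0 == 5 then "sisiSamaPanjang = 5" else "/"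

-- ===== PRECONDITION & SPEC =====
def Spec_isSegilimaSamaSisi (a : Int) (myList : List Int) (out : String) : Prop := out = isSegilimaSamaSisi_alt a myList
instance (a : Int) (myList : List Int) (out : String) : Decidable (Spec_isSegilimaSamaSisi a myList out) := by unfold Spec_isSegilimaSamaSisi; infer_instance

-- ===== CLAIM (what is proved, stated in full; the proofs are below) =====
def Claim_equal_isSegilimaSamaSisi : Prop := ∀ (a : Int) (myList : List Int), Dom_isSegilimaSamaSisi a myList → Spec_isSegilimaSamaSisi a myList (isSegilimaSamaSisi a myList)

-- ===== LEMMAS AND PROOFS =====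

-- predicate A's inner filter realises on a subset
def pv_p : List Int → Bool
  | [x, y] => decide (|x - y| ≤ 2)
  | _ => false

-- the mathematical pair count both programs compute
def pv_pc : List Int → Nat
  | [] => 0
  | x :: xs => xs.countP (fun y => decide (|x - y| ≤ 2)) + pv_pc xs

theorem pv_foldl_count {α : Type} (f : Int → α → Int) (q : α → Bool)
    (hf : ∀ c y, f c y = if q y then c + 1 else c) :
    ∀ (l : List α) (c : Int), l.foldl f c = c + (l.countP q : Int) := by
  intro l
  induction l with
  | nil => intro c; simp
  | cons y l ih =>
    intro c
    simp only [List.foldl_cons, List.countP_cons, hf, ih]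
    by_cases h : q y = true
    · simp only [if_pos h]
      push_cast
      ring
    · simp only [if_neg h]
      push_cast
      ring

theorem pv_p_of_len (s : List Int) (h : s.length ≠ 2) : pv_p s = false := by
  match s with
  | [] => rfl
  | [_] => rfl
  | [_, _] => simp at h
  | _ :: _ :: _ :: _ => rfl

theorem pv_mem_combos_length : ∀ (xs : List Int) (k : Nat) (s : List Int),
    s ∈ combos k xs → s.length = k := by
  intro xs
  induction xs with
  | nil =>
    intro k s hs
    cases k with
    | zero => simp [combos] at hs; simp [hs]
    | succ k => simp [combos] at hs
  | cons x xs ih =>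
    intro k s hs
    cases k with
    | zero => simp [combos] at hs; simp [hs]
    | succ k =>
      simp only [combos, List.mem_append, List.mem_map] at hs
      rcases hs with ⟨t, ht, rfl⟩ | hs
      · simp [ih k t ht]
      · exact ih (k+1) s hs

theorem pv_combos_one : ∀ (xs : List Int), combos 1 xs = xs.map (fun y => [y]) := by
  intro xs
  induction xs with
  | nil => rfl
  | cons x xs ih => simp [combos, ih]

theorem pv_countP_combos : ∀ (xs : List Int) (k : Nat),
    (combos k xs).countP pv_p = if k = 2 then pv_pc xs else 0 := by
  intro xs
  induction xs with
  | nil =>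
    intro k
    cases k with
    | zero => simp [combos]; decide
    | succ k =>
      have h : combos (k+1) ([] : List Int) = [] := by simp [combos]
      simp [h, pv_pc]
  | cons x xs ih =>
    intro k
    cases k with
    | zero => simp [combos]; decide
    | succ k =>
      simp only [combos, List.countP_append]
      rw [ih (k+1)]
      cases k with
      | zero =>
        have h0 : combos 0 xs = [[]] := by simp [combos]
        simp [h0, show pv_p [x] = false from rfl]
      | succ k =>
        cases k with
        | zero =>
          rw [pv_combos_one]
          have hc : ((xs.map (fun y => [y])).map (fun s => x :: s)).countP pv_p
              = xs.countP (fun y => decide (|x - y| ≤ 2)) := by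
            rw [List.map_map, List.countP_map]
            rfl
          simp only [hc]
          simp [pv_pc]
        | succ k =>
          have hz : ((combos (k+2) xs).map (fun s => x :: s)).countP pv_p = 0 := by
            rw [List.countP_eq_zero]
            intro s hs
            simp only [List.mem_map] at hs
            rcases hs with ⟨t, ht, rfl⟩
            have := pv_mem_combos_length xs (k+2) t ht
            simp [pv_p_of_len (x :: t) (by simp [this])]
          simp [hz]

theorem pv_A_inner (k : Nat) (xs : List Int) (c : Int) :
    (combos k xs).foldl (fun c subset =>
      match subset with
      | [x, y] => if |x - y| ≤ 2 then c + 1 else c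
      | _ => c) c = c + (if k = 2 then (pv_pc xs : Int) else 0) := by
  rw [pv_foldl_count _ pv_p]
  · rw [pv_countP_combos]
    split <;> simp
  · intro c s
    match s with
    | [] => simp [pv_p]
    | [_] => simp [pv_p]
    | [x, y] => simp [pv_p]
    | _ :: _ :: _ :: _ => simp [pv_p]

theorem pv_sum_zero (xs : List Int) : ∀ (l : List Int) (c : Int),
    (∀ L ∈ l, L.toNat ≠ 2) →
    l.foldl (fun c L => c + (if L.toNat = 2 then (pv_pc xs : Int) else 0)) c = c := by
  intro l
  induction l with
  | nil => intro c _; rfl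
  | cons L l ih =>
    intro c h
    simp only [List.foldl_cons]
    rw [if_neg (h L (by simp))]
    simpa using ih c (fun L hL => h L (by simp [hL]))

theorem pv_counter_eq (xs : List Int) :
    (PySem.List.pyRange 0 ((xs.length : Int) + 1) 1).foldl (fun c L =>
      (combos L.toNat xs).foldl (fun c subset =>
        match subset with
        | [x, y] => if |x - y| ≤ 2 then c + 1 else c
        | _ => c) c) 0 = (pv_pc xs : Int) := by
  have hcong : ∀ (l : List Int) (c : Int),
      l.foldl (fun c L =>
        (combos L.toNat xs).foldl (fun c subset =>
          match subset with
          | [x, y] => if |x - y| ≤ 2 then c + 1 else c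
          | _ => c) c) c
      = l.foldl (fun c L => c + (if L.toNat = 2 then (pv_pc xs : Int) else 0)) c := by
    intro l c
    simp only [pv_A_inner]
  rw [hcong]
  by_cases h : 2 ≤ xs.length
  · have hsplit : PySem.List.pyRange 0 ((xs.length : Int) + 1) 1
        = PySem.List.pyRange 0 2 1 ++ PySem.List.pyRange 2 ((xs.length : Int) + 1) 1 := by
      rw [PySem.List.pyRange_one_append 0 2 ((xs.length : Int) + 1) (by omega) (by omega)]
    have hsplit2 : PySem.List.pyRange 2 ((xs.length : Int) + 1) 1
        = (2 : Int) :: PySem.List.pyRange 3 ((xs.length : Int) + 1) 1 := by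
      rw [PySem.List.pyRange_one_cons (by omega)]
      norm_num
    have hz : ∀ L ∈ PySem.List.pyRange 3 ((xs.length : Int) + 1) 1, L.toNat ≠ 2 := by
      intro L hL
      rw [PySem.List.mem_pyRange_one] at hL
      omega
    have h01 : PySem.List.pyRange 0 2 1 = [0, 1] := by decide
    have ht0 : ((0:Int).toNat = 2) = False := by decide
    have ht1 : ((1:Int).toNat = 2) = False := by decide
    have ht2 : (2:Int).toNat = 2 := by decide
    rw [hsplit, hsplit2, List.foldl_append, h01]
    simp only [List.foldl_cons, List.foldl_nil]
    rw [pv_sum_zero xs _ _ hz]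
    simp [ht2]
  · match xs, h with
    | [], _ => decide
    | [x], _ =>
      have hlen : (([x].length : Int) + 1) = 2 := by simp
      have h01 : PySem.List.pyRange 0 2 1 = [0, 1] := by decide
      have ht0 : ((0:Int).toNat = 2) = False := by decide
      have ht1 : ((1:Int).toNat = 2) = False := by decide
      rw [hlen, h01]
      simp [pv_pc, List.foldl]
    | x :: y :: t, h => simp at h

theorem pv_altLoop_eq : ∀ (xs : List Int) (c : Int), altLoop xs c = c + (pv_pc xs : Int) := by
  intro xs
  induction xs with
  | nil => intro c; simp [altLoop, pv_pc]
  | cons x xs ih =>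
    intro c
    rw [altLoop, pv_foldl_count _ (fun y => decide (|x - y| ≤ 2))
        (by intro c y; by_cases h : |x - y| ≤ 2 <;> simp [h]), ih]
    simp [pv_pc]
    ring

-- ===== VERDICT (by name: the statement is the Claim_ definition above) =====
theorem isSegilimaSamaSisi_spec : Claim_equal_isSegilimaSamaSisi := by
  intro a myList _
  unfold Spec_isSegilimaSamaSisi isSegilimaSamaSisi isSegilimaSamaSisi_alt
  by_cases ha : a = 5
  · simp only [ha]
    norm_num
    rw [pv_counter_eq, pv_altLoop_eq]
    norm_num
  · simp [ha]
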